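-- pv_equiv track=rewrite | github.com/twilio-labs/socless_repo_parser | tests/mock_files/mock_socless_repo/functions/send_old_timey_telegram/lambda_function.py | build_telegram
-- ===== SOURCE A (Python) =====
-- def build_telegram(name: str, message: str, title="Dr") -> str:
--     """Generate a properly formatted telegram message body.
--
--     Args:
--         name:    The recipient of this telegram
--         message: The message to send this user
--         title:   The recipient's title
--     Returns:
--         A properly formatted string for a telegram message
--     """
--     STOP = " -STOP- "
--     punctuation = [".", ",", "!"]
--
--     for symbol in punctuation:
--         message = message.replace(symbol, STOP)
--
--     greeting = f"ATTN {title} {name}{STOP} "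
--
--     telegram = f"{greeting}{message}".upper()
--     return telegram
-- ===== SOURCE B (Python) =====
-- def build_telegram(name: str, message: str, title="Dr") -> str:
--     """Generate a properly formatted telegram message body (single-pass rewrite)."""
--     STOP = " -STOP- "
--     body = "".join(STOP if c in {".", ",", "!"} else c for c in message)
--     return f"ATTN {title} {name}{STOP} {body}".upper()
-- ===== Notes on version B (the rewrite author's own statement) =====
-- stated objective: alternative
-- what changed: Replaces the three sequential full-string replace() passes (one per punctuation symbol) with a single left-to-right scan that maps each character through a set-membership test and joins the pieces once.
import Mathlib
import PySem

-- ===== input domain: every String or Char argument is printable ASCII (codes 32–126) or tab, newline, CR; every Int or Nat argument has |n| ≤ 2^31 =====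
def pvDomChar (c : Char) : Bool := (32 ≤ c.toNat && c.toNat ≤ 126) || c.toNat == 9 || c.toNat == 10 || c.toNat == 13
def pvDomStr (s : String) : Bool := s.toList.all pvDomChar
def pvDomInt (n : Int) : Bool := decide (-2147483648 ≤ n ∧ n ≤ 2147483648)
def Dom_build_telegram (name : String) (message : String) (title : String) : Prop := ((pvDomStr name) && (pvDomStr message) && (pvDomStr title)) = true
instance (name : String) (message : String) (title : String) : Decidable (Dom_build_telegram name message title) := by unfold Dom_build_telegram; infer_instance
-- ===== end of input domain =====

-- B replaces A's three sequential replace() passes with ONE left-to-right scan mapping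
-- each character through a punctuation-membership test; same output, different traversal.

-- ===== PORT A =====
def build_telegram (name : String) (message : String) (title : String) : String :=
  let STOP : String := " -STOP- "
  let m1 := PySem.Str.replace message "." STOP
  let m2 := PySem.Str.replace m1 "," STOP
  let m3 := PySem.Str.replace m2 "!" STOP
  let greeting := "ATTN " ++ title ++ " " ++ name ++ STOP ++ " "
  PySem.Str.upper (greeting ++ m3)

-- ===== PORT B =====
def build_telegram_alt (name : String) (message : String) (title : String) : String :=
  let STOP : String := " -STOP- "
  let body := String.ofList (message.toList.flatMap
    (fun c => if c ∈ ['.', ',', '!'] then STOP.toList else [c]))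
  PySem.Str.upper ("ATTN " ++ title ++ " " ++ name ++ STOP ++ " " ++ body)

-- ===== PRECONDITION & SPEC =====
def Spec_build_telegram (name : String) (message : String) (title : String) (out : String) : Prop := out = build_telegram_alt name message title
instance (name : String) (message : String) (title : String) (out : String) : Decidable (Spec_build_telegram name message title out) := by unfold Spec_build_telegram; infer_instance

-- ===== CLAIM =====
def Claim_equal_build_telegram : Prop := ∀ (name : String) (message : String) (title : String), Dom_build_telegram name message title → Spec_build_telegram name message title (build_telegram name message title)

-- ===== LEMMAS AND PROOFS =====

-- replace with a single-character pattern is a per-character flatMap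
theorem replace_go_single (p : Char) (new : List Char) :
    ∀ (l acc : List Char) (fuel : Nat), l.length ≤ fuel →
      PySem.Chars.replace.go [p] new fuel l acc
        = acc.reverse ++ l.flatMap (fun c => if c = p then new else [c]) := by
  intro l
  induction l with
  | nil =>
    intro acc fuel _
    cases fuel <;> simp [PySem.Chars.replace.go]
  | cons c t ih =>
    intro acc fuel hf
    cases fuel with
    | zero => simp at hf
    | succ n =>
      by_cases h : c = p
      · subst h
        have : List.isPrefixOf [c] (c :: t) = true := by simp [List.isPrefixOf]
        simp [PySem.Chars.replace.go, this, ih (new.reverse ++ acc) n (by simpa using hf)]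
      · have : List.isPrefixOf [p] (c :: t) = false := by
          simp [List.isPrefixOf]; exact fun hc => absurd hc.symm h
        simp [PySem.Chars.replace.go, this, ih (c :: acc) n (by simpa using hf), h]

theorem replace_single (p : Char) (new s : List Char) :
    PySem.Chars.replace s [p] new = s.flatMap (fun c => if c = p then new else [c]) := by
  simpa using replace_go_single p new s [] s.length le_rfl

theorem toList_inj' (s t : String) (h : s.toList = t.toList) : s = t := by
  have := congrArg String.ofList h
  simpa using this
theorem combine_passes (m : List Char) :
    List.flatMap (fun c => if c = '!' then " -STOP- ".toList else [c])
      (List.flatMap (fun c => if c = ',' then " -STOP- ".toList else [c])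
        (List.flatMap (fun c => if c = '.' then " -STOP- ".toList else [c]) m))
    = List.flatMap (fun c => if c ∈ ['.', ',', '!'] then " -STOP- ".toList else [c]) m := by
  induction m with
  | nil => rfl
  | cons c t ih =>
    simp only [List.flatMap_cons, List.flatMap_append, ih]
    congr 1
    by_cases h1 : c = '.'
    · subst h1; decide
    by_cases h2 : c = ','
    · subst h2; decide
    by_cases h3 : c = '!'
    · subst h3; decide
    simp [h1, h2, h3]

-- ===== VERDICT =====
theorem build_telegram_spec : Claim_equal_build_telegram := by
  intro name message title _
  unfold Spec_build_telegram build_telegram build_telegram_alt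
  apply toList_inj'
  rw [PySem.Str.toList_upper, PySem.Str.toList_upper]
  refine congrArg (List.map PySem.Chars.upperChar) ?_
  simp only [String.toList_append, PySem.Str.toList_replace, String.toList_ofList]
  rw [show ("." : String).toList = ['.'] from rfl, show ("," : String).toList = [','] from rfl,
      show ("!" : String).toList = ['!'] from rfl]
  rw [replace_single, replace_single, replace_single, combine_passes]
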